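-- pv_equiv track=rewrite | github.com/TepidJesus/Xi-Bot | message_analyzer.py | run_message_checks
-- ===== SOURCE A (Python) =====
-- FORBIDDEN_WORDS = ['bad', 'stupid', 'worse', 'hate', 'overthrow', 'awful', 'dreadful', 'poor', 'cheap', 'imperfect', 'sucks', 'suck', 'trash', 'garbage', 'dislike', 'shit', 'fuck', 'worst', 'terrible', 'dumb', 'cool', 'amazingly', 'stoopid', 'gey', 'sus', 'imposter', 'corrupt']
--
-- PRAISE_WORDS = ['good', '#1', 'number 1', 'great', 'fucks', 'pog', 'poggers', 'best', 'amazing', 'love', 'china#1', 'superior', 'praise', 'very', 'predatorial']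
--
-- CHINA_WORDS = ['china', 'chinese', 'xi']
--
-- NEGATIONS = ['isn\'t', 'not', 'never', 'isnt']
--
-- def run_message_checks(message_list):
--     bad_word_check = any(other_word in message_list for other_word in FORBIDDEN_WORDS)
--     praise_word_check = any(other_word in message_list for other_word in PRAISE_WORDS)
--     china_check = any(other_word in message_list for other_word in CHINA_WORDS)
--
--     for i in range(len(message_list)):
--         if message_list[i] in PRAISE_WORDS and message_list[i-1] in NEGATIONS:
--             bad_word_check = True
--         elif message_list[i] in FORBIDDEN_WORDS and message_list[i-1] in NEGATIONS:
--             bad_word_check = False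
--
--     return bad_word_check, praise_word_check, china_check
-- ===== SOURCE B (Python) =====
-- FORBIDDEN_WORDS = ['bad', 'stupid', 'worse', 'hate', 'overthrow', 'awful', 'dreadful', 'poor', 'cheap', 'imperfect', 'sucks', 'suck', 'trash', 'garbage', 'dislike', 'shit', 'fuck', 'worst', 'terrible', 'dumb', 'cool', 'amazingly', 'stoopid', 'gey', 'sus', 'imposter', 'corrupt']
--
-- PRAISE_WORDS = ['good', '#1', 'number 1', 'great', 'fucks', 'pog', 'poggers', 'best', 'amazing', 'love', 'china#1', 'superior', 'praise', 'very', 'predatorial']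
--
-- CHINA_WORDS = ['china', 'chinese', 'xi']
--
-- NEGATIONS = ['isn\'t', 'not', 'never', 'isnt']
--
-- def run_message_checks(message_list):
--     praise_word_check = any(w in message_list for w in PRAISE_WORDS)
--     china_check = any(w in message_list for w in CHINA_WORDS)
--     bad_word_check = any(w in message_list for w in FORBIDDEN_WORDS)
--     # reverse scan: the rightmost negated praise/forbidden word decides
--     for i in range(len(message_list) - 1, -1, -1):
--         prev = message_list[i - 1]
--         if message_list[i] in PRAISE_WORDS and prev in NEGATIONS:
--             bad_word_check = True
--             break
--         elif message_list[i] in FORBIDDEN_WORDS and prev in NEGATIONS: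
--             bad_word_check = False
--             break
--     return bad_word_check, praise_word_check, china_check
-- ===== Notes on version B (the rewrite author's own statement) =====
-- stated objective: alternative
-- what changed: A's forward loop that overwrites the flag at every negated praise/forbidden pair is replaced by a reverse scan that breaks at the first (rightmost) decisive pair, defaulting to the plain forbidden-word check.
import Mathlib
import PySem

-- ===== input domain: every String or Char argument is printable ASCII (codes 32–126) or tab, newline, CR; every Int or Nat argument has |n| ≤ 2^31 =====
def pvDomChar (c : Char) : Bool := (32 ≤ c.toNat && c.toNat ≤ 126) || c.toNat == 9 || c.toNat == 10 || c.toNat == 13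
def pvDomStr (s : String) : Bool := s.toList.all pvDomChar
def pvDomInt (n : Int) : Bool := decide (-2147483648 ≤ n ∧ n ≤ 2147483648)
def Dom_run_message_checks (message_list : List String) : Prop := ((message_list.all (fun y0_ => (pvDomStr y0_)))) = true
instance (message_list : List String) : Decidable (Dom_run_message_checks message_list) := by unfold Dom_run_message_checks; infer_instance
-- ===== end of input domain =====

-- B replaces A's forward overwriting loop by a reverse scan that stops at the first
-- (i.e. rightmost) decisive negated praise/forbidden pair (objective: alternative).

def pvForbidden : List String := ["bad", "stupid", "worse", "hate", "overthrow", "awful", "dreadful", "poor", "cheap", "imperfect", "sucks", "suck", "trash", "garbage", "dislike", "shit", "fuck", "worst", "terrible", "dumb", "cool", "amazingly", "stoopid", "gey", "sus", "imposter", "corrupt"]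
def pvPraise : List String := ["good", "#1", "number 1", "great", "fucks", "pog", "poggers", "best", "amazing", "love", "china#1", "superior", "praise", "very", "predatorial"]
def pvChina : List String := ["china", "chinese", "xi"]
def pvNegations : List String := ["isn't", "not", "never", "isnt"]

-- ===== PORT A =====
-- A's loop body: overwrite bad_word_check at every decisive index i
def pvStepA (message_list : List String) (b : Bool) (i : Int) : Bool :=
  if (PySem.List.pyGet? message_list i).getD "" ∈ pvPraise ∧
     (PySem.List.pyGet? message_list (i - 1)).getD "" ∈ pvNegations then true
  else if (PySem.List.pyGet? message_list i).getD "" ∈ pvForbidden ∧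
          (PySem.List.pyGet? message_list (i - 1)).getD "" ∈ pvNegations then false
  else b

def run_message_checks (message_list : List String) : Bool × Bool × Bool :=
  let bad_word_check := pvForbidden.any (fun w => message_list.contains w)
  let praise_word_check := pvPraise.any (fun w => message_list.contains w)
  let china_check := pvChina.any (fun w => message_list.contains w)
  let bad_word_check :=
    (PySem.List.pyRange 0 (message_list.length : Int)).foldl (pvStepA message_list) bad_word_check
  (bad_word_check, praise_word_check, china_check)

-- ===== PORT B =====
-- reverse scan: i runs n-1, n-2, …, 0; break (= stop recursing) at the first decisive pair
def pvScanRev (message_list : List String) : Nat → Bool → Bool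
  | 0, bad => bad
  | k + 1, bad =>
    let cur := (PySem.List.pyGet? message_list (k : Int)).getD ""
    let prev := (PySem.List.pyGet? message_list ((k : Int) - 1)).getD ""
    if cur ∈ pvPraise ∧ prev ∈ pvNegations then true
    else if cur ∈ pvForbidden ∧ prev ∈ pvNegations then false
    else pvScanRev message_list k bad

def run_message_checks_alt (message_list : List String) : Bool × Bool × Bool :=
  let praise_word_check := pvPraise.any (fun w => message_list.contains w)
  let china_check := pvChina.any (fun w => message_list.contains w)
  let bad_word_check :=
    pvScanRev message_list message_list.length (pvForbidden.any (fun w => message_list.contains w))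
  (bad_word_check, praise_word_check, china_check)

-- ===== PRECONDITION & SPEC =====
def Spec_run_message_checks (message_list : List String) (out : Bool × Bool × Bool) : Prop := out = run_message_checks_alt message_list
instance (message_list : List String) (out : Bool × Bool × Bool) : Decidable (Spec_run_message_checks message_list out) := by unfold Spec_run_message_checks; infer_instance

-- ===== CLAIM (what is proved, stated in full; the proofs are below) =====
def Claim_equal_run_message_checks : Prop := ∀ (message_list : List String), Dom_run_message_checks message_list → Spec_run_message_checks message_list (run_message_checks message_list)

-- ===== LEMMAS AND PROOFS =====

-- A's left fold over range(n) and B's reverse scan compute the same flag: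
-- the last overwrite of the forward loop is the first decisive index seen from the right.
theorem pvLoop_eq (xs : List String) :
    ∀ (n : Nat) (b : Bool),
      (PySem.List.pyRange 0 (n : Int)).foldl (pvStepA xs) b = pvScanRev xs n b := by
  intro n
  induction n with
  | zero => intro b; rfl
  | succ k ih =>
    intro b
    have hcast : ((k + 1 : Nat) : Int) = (k : Int) + 1 := by push_cast; ring
    rw [hcast, PySem.List.pyRange_one_succ_right (by positivity), List.foldl_append]
    simp only [List.foldl, pvScanRev, ih, pvStepA]

-- ===== VERDICT (by name: the statement is the Claim_ definition above) =====

theorem run_message_checks_spec : Claim_equal_run_message_checks := by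
  intro xs _
  unfold Spec_run_message_checks run_message_checks run_message_checks_alt
  simp only [pvLoop_eq]
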